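-- pv_equiv track=rewrite | github.com/luhcasgabriel/StoneChallenge | stone_challenge.py | checkEmails
-- ===== SOURCE A (Python) =====
-- def checkEmails(emails_list):
--
--     # check if email list is valid
--     if emails_list:
--
--         # check if list items are of type str
--         for email in emails_list:
--             if not isinstance(email, str):
--                 return 'one of the emails is invalid'
--
--             # checks if emails are valid
--             if '@' not in email or '.com' not in email:
--                 return 'invalid email'
--
--         # check for duplicate emails
--         count = 0
--         for i in emails_list:
--             for y in emails_list:
--
--                 if i == y:
--                     count += 1
--
--             if count > 1:
--                 return 'duplicate emails in the email list, please check'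
--             count = 0
--
--
--     else:
--       return 'Empty emails list'
-- ===== SOURCE B (Python) =====
-- def checkEmails(emails_list):
--     # B: one validation pass via any(), then a set-cardinality duplicate test
--     # instead of A's quadratic nested counting loops.
--     if not emails_list:
--         return 'Empty emails list'
--     if any(not isinstance(e, str) for e in emails_list):
--         return 'one of the emails is invalid'
--     if any('@' not in e or '.com' not in e for e in emails_list):
--         return 'invalid email'
--     if len(set(emails_list)) < len(emails_list):
--         return 'duplicate emails in the email list, please check'
--     return None
-- ===== Notes on version B (the rewrite author's own statement) =====
-- stated objective: simpler
-- what changed: Replaced A's quadratic nested duplicate-counting loops with one set-cardinality test (len(set(xs)) < len(xs)) and expressed the validation pass as any() over a generator, keeping error precedence.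
import Mathlib
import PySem

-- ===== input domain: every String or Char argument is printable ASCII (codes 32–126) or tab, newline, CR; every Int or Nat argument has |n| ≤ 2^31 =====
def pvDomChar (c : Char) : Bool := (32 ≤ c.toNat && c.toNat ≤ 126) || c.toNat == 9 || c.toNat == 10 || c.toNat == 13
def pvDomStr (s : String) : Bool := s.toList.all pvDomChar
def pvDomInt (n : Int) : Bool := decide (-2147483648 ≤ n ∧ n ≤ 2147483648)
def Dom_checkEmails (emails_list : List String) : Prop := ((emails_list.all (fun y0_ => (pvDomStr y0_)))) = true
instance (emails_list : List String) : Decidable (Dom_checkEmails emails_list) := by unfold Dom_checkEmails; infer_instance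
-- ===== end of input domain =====

-- B replaces A's nested duplicate-counting loops with a single set-cardinality
-- test (and one any-pass for validation); same return value, simpler structure.


-- ===== PORT A =====
-- A's validation loop: isinstance(email, str) is identically true for List String,
-- so that branch can never fire; the '@'/'.com' test is ported literally.
def pvValidLoopA : List String → Option String
  | [] => none
  | email :: rest =>
    if !(PySem.Str.isIn "@" email) || !(PySem.Str.isIn ".com" email) then
      some "invalid email"
    else pvValidLoopA rest

-- A's nested duplicate scan: for each i, count occurrences of i in the whole list.
def pvDupLoopA (all : List String) : List String → Option String
  | [] => none
  | i :: rest =>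
    let count : Int := all.foldl (fun c y => if i == y then c + 1 else c) 0
    if count > 1 then some "duplicate emails in the email list, please check"
    else pvDupLoopA all rest

def checkEmails (emails_list : List String) : Option String :=
  if emails_list ≠ [] then
    match pvValidLoopA emails_list with
    | some r => some r
    | none => pvDupLoopA emails_list emails_list
  else some "Empty emails list"

-- ===== PORT B =====
-- B: guard clauses; any() validation pass (the isinstance any() is identically
-- false for List String); duplicate test by set cardinality (PySem.Set.ofList = set()).
def checkEmails_alt (emails_list : List String) : Option String :=
  if emails_list = [] then some "Empty emails list"
  else if emails_list.any (fun e => !(PySem.Str.isIn "@" e) || !(PySem.Str.isIn ".com" e)) then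
    some "invalid email"
  else if (PySem.Set.ofList emails_list).length < emails_list.length then
    some "duplicate emails in the email list, please check"
  else none

-- ===== PRECONDITION & SPEC =====
def Spec_checkEmails (emails_list : List String) (out : Option String) : Prop := out = checkEmails_alt emails_list
instance (emails_list : List String) (out : Option String) : Decidable (Spec_checkEmails emails_list out) := by unfold Spec_checkEmails; infer_instance

-- ===== CLAIM (what is proved, stated in full; the proofs are below) =====
def Claim_equal_checkEmails : Prop := ∀ (emails_list : List String), Dom_checkEmails emails_list → Spec_checkEmails emails_list (checkEmails emails_list)

-- ===== LEMMAS AND PROOFS =====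

theorem pvValidLoopA_eq (l : List String) :
    pvValidLoopA l =
      if l.any (fun e => !(PySem.Str.isIn "@" e) || !(PySem.Str.isIn ".com" e)) then
        some "invalid email" else none := by
  induction l with
  | nil => rfl
  | cons e rest ih =>
    rw [pvValidLoopA, ih, List.any_cons]
    cases h : (!(PySem.Str.isIn "@" e) || !(PySem.Str.isIn ".com" e)) <;>
      simp only [h, Bool.true_or, Bool.false_or, Bool.false_eq_true,
        reduceIte]

theorem pvDupLoopA_eq (all : List String) (rest : List String) :
    pvDupLoopA all rest =
      if rest.any (fun i => 1 < all.count i) then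
        some "duplicate emails in the email list, please check" else none := by
  induction rest with
  | nil => rfl
  | cons i r ih =>
    have hfun : (fun (c : Int) y => if i == y then c + 1 else c)
        = (fun (c : Int) y => if y == i then c + 1 else c) := by
      funext c y; rw [Bool.beq_comm]
    have hcnt : (all.foldl (fun c y => if i == y then c + 1 else c) 0 : Int)
        = (all.count i : Int) := by
      rw [hfun]
      simpa using PySem.List.foldl_beq_add_one (l := all) (v := i) (a := (0 : Int))
    rw [pvDupLoopA, List.any_cons]
    simp only [hcnt, ih]
    by_cases h : 1 < all.count i
    · have h' : (all.count i : Int) > 1 := by exact_mod_cast h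
      simp [h, h']
    · have h' : ¬ ((all.count i : Int) > 1) := by exact_mod_cast h
      simp [h, h']

-- PySem's set(xs) (first-occurrence dedup) is a sublist of xs.
theorem pvOfList_sublist (l : List String) : (PySem.Set.ofList l).Sublist l := by
  induction l with
  | nil => simp [PySem.Set.ofList]
  | cons x xs ih =>
    have h1 : PySem.Set.ofList (x :: xs) = PySem.Set.update [x] xs := by
      simp [PySem.Set.ofList_eq_foldl, PySem.Set.update, PySem.Set.add, PySem.Set.contains]
    have h : PySem.Set.ofList (x :: xs)
        = x :: (PySem.Set.ofList xs).filter (fun y => !(PySem.Set.contains [x] y)) := by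
      rw [h1, PySem.Set.update_eq_append_filter]; rfl
    rw [h]
    exact List.Sublist.cons₂ x (List.Sublist.trans List.filter_sublist ih)

theorem pvLen_ofList_lt_iff (l : List String) :
    ((PySem.Set.ofList l).length < l.length) ↔ ¬ l.Nodup := by
  have hsub := pvOfList_sublist l
  constructor
  · intro hlt hnd
    -- l is Nodup and every element of l is in set(l), so l.length ≤ (set l).length
    have hsp : l.Subperm (PySem.Set.ofList l) :=
      hnd.subperm (fun x hx => (PySem.Set.mem_ofList _ _).mpr hx)
    exact absurd hsp.length_le (by omega)
  · intro hnd
    rcases eq_or_lt_of_le hsub.length_le with h | h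
    · exact absurd ((hsub.eq_of_length h) ▸ PySem.Set.nodup_ofList l) hnd
    · exact h

theorem pvAnyDup_iff (l : List String) :
    (l.any (fun i => 1 < l.count i) = true) ↔ ¬ l.Nodup := by
  rw [List.nodup_iff_count_le_one]
  simp only [List.any_eq_true, decide_eq_true_eq, not_forall]
  constructor
  · rintro ⟨i, _, h⟩; exact ⟨i, by omega⟩
  · rintro ⟨i, h⟩
    exact ⟨i, List.count_pos_iff.mp (by omega), by omega⟩

-- ===== VERDICT (by name: the statement is the Claim_ definition above) =====
theorem checkEmails_spec : Claim_equal_checkEmails := by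
  intro l _
  unfold Spec_checkEmails checkEmails checkEmails_alt
  by_cases hnil : l = []
  · subst hnil; simp
  · rw [if_pos hnil, if_neg hnil, pvValidLoopA_eq]
    cases hv : l.any (fun e => !(PySem.Str.isIn "@" e) || !(PySem.Str.isIn ".com" e)) with
    | true => simp only [hv, reduceIte]
    | false =>
      simp only [hv, Bool.false_eq_true, reduceIte]
      rw [pvDupLoopA_eq]
      cases hd : l.any (fun i => 1 < l.count i) with
      | true =>
        have h1 : ¬ l.Nodup := (pvAnyDup_iff l).mp hd
        rw [← pvLen_ofList_lt_iff] at h1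
        simp only [reduceIte, if_pos h1]
      | false =>
        have h1 : ¬ ¬ l.Nodup := fun h => by
          rw [← pvAnyDup_iff l] at h; rw [hd] at h; exact Bool.false_ne_true h
        rw [← pvLen_ofList_lt_iff] at h1
        simp only [Bool.false_eq_true, reduceIte, if_neg h1]
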